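-- pv_equiv track=rewrite | github.com/miliar/Code_Jam_Webscraper | solutions_python/Problem_2/409.py | calcSheduleTrains
-- ===== SOURCE A (Python) =====
-- def calcSheduleTrains(shedule, pool):
--     if len(pool) == 0:
--         return len(shedule)
--     poolPos = 0
--     result = 0
--     for i in range(len(shedule)):
--         if shedule[i][0] >= pool[poolPos]:
--             poolPos += 1
--             if poolPos == len(pool):
--                 return result + len(shedule) - i - 1
--         else:
--             result += 1
--     return result
-- ===== SOURCE B (Python) =====
-- def calcSheduleTrains(shedule, pool):
--     # Pool-driven staged matching: for each pool start time in order, search the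
--     # remaining schedule for the first train it can serve and cut the schedule
--     # there; unmatched trains = total - matched pool slots.
--     matched = 0
--     rest = shedule
--     for p in pool:
--         k = None
--         for idx, row in enumerate(rest):
--             if row[0] >= p:
--                 k = idx
--                 break
--         if k is None:
--             break
--         matched += 1
--         rest = rest[k + 1:]
--     return len(shedule) - matched
-- ===== Notes on version B (the rewrite author's own statement) =====
-- stated objective: alternative
-- what changed: Inverts the iteration: instead of A's single pass over the schedule with a pool pointer and accumulator of unmatched trains, B loops over the pool slots, for each one searching the remaining schedule for the first usable train and slicing it off, and returns len(shedule) minus the number of consumed slots.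
-- outside the precondition, e.g. on calcSheduleTrains([(5,), ()], [1]): A returns 1, B returns 1
import Mathlib
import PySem

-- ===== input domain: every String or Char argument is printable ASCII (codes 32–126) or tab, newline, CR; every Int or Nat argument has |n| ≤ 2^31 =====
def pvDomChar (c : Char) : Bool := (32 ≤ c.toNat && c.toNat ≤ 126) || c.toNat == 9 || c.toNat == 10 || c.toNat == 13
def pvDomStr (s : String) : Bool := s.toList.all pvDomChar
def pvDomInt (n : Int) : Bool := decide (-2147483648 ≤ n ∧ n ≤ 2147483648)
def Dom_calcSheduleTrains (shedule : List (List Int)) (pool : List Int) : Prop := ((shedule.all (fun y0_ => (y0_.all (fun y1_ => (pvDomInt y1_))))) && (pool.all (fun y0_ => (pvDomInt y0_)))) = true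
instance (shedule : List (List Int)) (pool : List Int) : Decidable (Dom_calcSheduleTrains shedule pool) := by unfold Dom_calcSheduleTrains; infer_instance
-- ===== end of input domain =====

-- B inverts the iteration: instead of A's schedule pass with a pool pointer and an
-- unmatched-count accumulator, B recurses over the pool slots, searching the
-- remaining schedule for the first usable train per slot, and returns
-- len(shedule) - matched (objective: alternative).


-- ===== PORT A =====
-- A's for-loop over range(len(shedule)) with state (poolPos, result) and an early
-- return when the pool is exhausted. shedule[i][0] / pool[poolPos] are ported with
-- PySem.List.pyGet?; Pre_ guarantees the access never yields none, the .getD 0 is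
-- only the totalising default outside Pre_.
def calcAGo (pool : List Int) (n : Int) : List (List Int) → Int → Int → Int → Int
  | [], _, _, result => result
  | row :: rest, i, poolPos, result =>
    if (PySem.List.pyGet? row 0).getD 0 ≥ (PySem.List.pyGet? pool poolPos).getD 0 then
      if poolPos + 1 = (pool.length : Int) then result + n - i - 1
      else calcAGo pool n rest (i + 1) (poolPos + 1) result
    else calcAGo pool n rest (i + 1) poolPos (result + 1)

def calcSheduleTrains (shedule : List (List Int)) (pool : List Int) : Int :=
  if pool.length = 0 then (shedule.length : Int)
  else calcAGo pool (shedule.length : Int) shedule 0 0 0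

-- ===== PORT B =====
-- B's inner enumerate-search: index of the first remaining train with start ≥ p.
def findGE (p : Int) : List (List Int) → Option Nat
  | [] => none
  | row :: rest =>
    if (PySem.List.pyGet? row 0).getD 0 ≥ p then some 0
    else (findGE p rest).map (· + 1)

-- B's outer for-loop over the pool with state (rest, matched); breaks when a slot
-- finds no train.
def calcBGo : List Int → List (List Int) → Int → Int
  | [], _, matched => matched
  | p :: ps, rest, matched =>
    match findGE p rest with
    | none => matched
    | some k => calcBGo ps (rest.drop (k + 1)) (matched + 1)

def calcSheduleTrains_alt (shedule : List (List Int)) (pool : List Int) : Int :=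
  (shedule.length : Int) - calcBGo pool shedule 0

-- ===== PRECONDITION & SPEC =====
-- Pre_ excludes schedules containing an empty inner row while the pool is nonempty:
-- there Python A's shedule[i][0] can raise IndexError (B raises on exactly the same
-- inputs). The exclusion is slightly conservative: if the pool is exhausted before
-- the empty row is reached, both programs still return (the same value).
def Pre_calcSheduleTrains (shedule : List (List Int)) (pool : List Int) : Prop :=
  pool = [] ∨ ∀ row ∈ shedule, row ≠ []
instance (shedule : List (List Int)) (pool : List Int) : Decidable (Pre_calcSheduleTrains shedule pool) := by unfold Pre_calcSheduleTrains; infer_instance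

def pvWitness_calcSheduleTrains : List (List Int) × List Int := ([[1], [3], [2]], [2, 5])

def Spec_calcSheduleTrains (shedule : List (List Int)) (pool : List Int) (out : Int) : Prop := out = calcSheduleTrains_alt shedule pool
instance (shedule : List (List Int)) (pool : List Int) (out : Int) : Decidable (Spec_calcSheduleTrains shedule pool out) := by unfold Spec_calcSheduleTrains; infer_instance

-- ===== CLAIM (what is proved, stated in full; the proofs are below) =====
def Claim_equal_calcSheduleTrains : Prop := ∀ (shedule : List (List Int)) (pool : List Int), Dom_calcSheduleTrains shedule pool → Pre_calcSheduleTrains shedule pool → Spec_calcSheduleTrains shedule pool (calcSheduleTrains shedule pool)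

-- ===== LEMMAS AND PROOFS =====

-- the accumulator of B's loop only shifts the result
theorem calcBGo_shift (ps : List Int) : ∀ (rest : List (List Int)) (m : Int),
    calcBGo ps rest m = m + calcBGo ps rest 0 := by
  induction ps with
  | nil => intro rest m; simp [calcBGo]
  | cons p ps ih =>
    intro rest m
    simp only [calcBGo]
    cases findGE p rest with
    | none => simp
    | some k =>
      simp only
      rw [ih (rest.drop (k + 1)) (m + 1), ih (rest.drop (k + 1)) (0 + 1)]
      ring

-- a train too early for the current slot is skipped by the search
theorem calcBGo_skip (p : Int) (ps : List Int) (row : List Int) (rest : List (List Int)) (m : Int)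
    (h : ¬ (PySem.List.pyGet? row 0).getD 0 ≥ p) :
    calcBGo (p :: ps) (row :: rest) m = calcBGo (p :: ps) rest m := by
  simp only [calcBGo, findGE, if_neg h]
  cases findGE p rest with
  | none => simp
  | some k => simp [List.drop]

-- a train usable by the current slot is consumed immediately
theorem calcBGo_take (p : Int) (ps : List Int) (row : List Int) (rest : List (List Int)) (m : Int)
    (h : (PySem.List.pyGet? row 0).getD 0 ≥ p) :
    calcBGo (p :: ps) (row :: rest) m = calcBGo ps rest (m + 1) := by
  simp [calcBGo, findGE, if_pos h, List.drop]

-- B's loop returns its accumulator on an empty schedule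
theorem calcBGo_nil (ps : List Int) (m : Int) : calcBGo ps [] m = m := by
  cases ps <;> simp [calcBGo, findGE]

-- the bridge invariant: A's remaining run from state (i, poolPos = pp, result = i - pp)
-- returns n minus (slots already consumed + slots B's run still consumes)
theorem calcGo_eq (pool : List Int) (n : Int) :
    ∀ (rest : List (List Int)) (i : Int) (pp : Nat),
      pp < pool.length → i + (rest.length : Int) = n →
      calcAGo pool n rest i (pp : Int) (i - (pp : Int)) =
        n - ((pp : Int) + calcBGo (pool.drop pp) rest 0) := by
  intro rest
  induction rest with
  | nil =>
    intro i pp _ hlen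
    simp only [List.length_nil, Int.natCast_zero, add_zero] at hlen
    simp [calcAGo, calcBGo_nil, hlen]
  | cons row rest ih =>
    intro i pp hlt hlen
    simp only [List.length_cons] at hlen
    push_cast at hlen
    have hdrop : pool.drop pp = pool[pp] :: pool.drop (pp + 1) :=
      List.drop_eq_getElem_cons hlt
    have hpp : (PySem.List.pyGet? pool (pp : Int)).getD 0 = pool[pp] := by
      simp [PySem.List.pyGet?_natCast, List.getElem?_eq_getElem hlt]
    simp only [calcAGo, hpp]
    by_cases hm : (PySem.List.pyGet? row 0).getD 0 ≥ pool[pp]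
    · have htake : calcBGo (pool.drop pp) (row :: rest) 0
          = calcBGo (pool.drop (pp + 1)) rest (0 + 1) := by
        rw [hdrop]; exact calcBGo_take _ _ _ _ _ hm
      rw [if_pos hm]
      by_cases hfull : (pp : Int) + 1 = (pool.length : Int)
      · have hnil : pool.drop (pp + 1) = [] := List.drop_eq_nil_of_le (by omega)
        rw [if_pos hfull, htake, hnil]
        simp only [calcBGo]
        omega
      · have hIH := ih (i + 1) (pp + 1) (by omega) (by omega)
        push_cast at hIH
        rw [if_neg hfull,
            show i - (pp : Int) = i + 1 - ((pp : Int) + 1) from by ring,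
            hIH, htake, calcBGo_shift (pool.drop (pp + 1)) rest (0 + 1)]
        ring
    · have hskip : calcBGo (pool.drop pp) (row :: rest) 0
          = calcBGo (pool.drop pp) rest 0 := by
        rw [hdrop]; exact calcBGo_skip _ _ _ _ _ hm
      rw [if_neg hm,
          show i - (pp : Int) + 1 = (i + 1) - (pp : Int) from by ring,
          ih (i + 1) pp hlt (by omega), hskip]

-- ===== VERDICT (by name: the statement is the Claim_ definition above) =====
theorem calcSheduleTrains_spec : Claim_equal_calcSheduleTrains := by
  intro shedule pool _ _
  show calcSheduleTrains shedule pool = calcSheduleTrains_alt shedule pool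
  unfold calcSheduleTrains calcSheduleTrains_alt
  by_cases hp : pool.length = 0
  · have : pool = [] := List.length_eq_zero_iff.mp hp
    simp [this, calcBGo]
  · have := calcGo_eq pool (shedule.length : Int) shedule 0 0 (by omega) (by simp)
    simpa [hp] using this
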